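-- pv_equiv track=rewrite | github.com/kianush00/Graphsearch | backend/app/models/srex/binary_expression_tree.py | __process_boolean_tokens_delete_colon_and_keys
-- ===== SOURCE A (Python) =====
-- def __process_boolean_tokens_delete_colon_and_keys(tokens: list[str]) -> list[str]:
--     """
--     Process boolean query tokens to delete colon (:) and key expressions.
--
--     This function iterates through the tokens list, identifies colon (:) expressions, and removes them.
--     It also identifies key expressions (tokens that follow a colon) and removes them.
--
--     Parameters:
--     tokens (list[str]): A list of boolean query tokens.
--
--     Returns:
--     list[str]: A list of boolean query tokens with colon (:) and key expressions removed.
--     """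
--     prev_index = 0
--     indices_to_remove = []
--     for index, token in enumerate(tokens):
--         if token == ':':
--             prev_index = index
--             while prev_index > 0:
--                 if tokens[prev_index - 1] in ['AND', 'OR', '(']:
--                     break
--                 else:
--                     prev_index -= 1
--             indices_to_remove.extend(range(prev_index, index+1))  # add the indexes to delete their values
--     processed_tokens = [token for index, token in enumerate(tokens) if index not in indices_to_remove]
--     return processed_tokens
-- ===== SOURCE B (Python) =====
-- def __process_boolean_tokens_delete_colon_and_keys(tokens: list[str]) -> list[str]:
--     """Single forward pass: buffer tokens since the last operator/'('; a ':' drops the buffer (and itself)."""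
--     out = []
--     buf = []
--     for token in tokens:
--         if token == ':':
--             buf = []
--         elif token in ('AND', 'OR', '('):
--             out.extend(buf)
--             out.append(token)
--             buf = []
--         else:
--             buf.append(token)
--     out.extend(buf)
--     return out
-- ===== Notes on version B (the rewrite author's own statement) =====
-- stated objective: alternative
-- what changed: Replaced A's scheme (for each ':' a backward scan to the previous operator, an index-removal list, and a final filter with linear membership tests) by one forward pass that buffers tokens since the last operator and drops the buffer when a ':' is seen; intended as asymptotically faster (worst case O(n^2) vs O(n)) but measured only 1.37x on the generated inputs.
import Mathlib
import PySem

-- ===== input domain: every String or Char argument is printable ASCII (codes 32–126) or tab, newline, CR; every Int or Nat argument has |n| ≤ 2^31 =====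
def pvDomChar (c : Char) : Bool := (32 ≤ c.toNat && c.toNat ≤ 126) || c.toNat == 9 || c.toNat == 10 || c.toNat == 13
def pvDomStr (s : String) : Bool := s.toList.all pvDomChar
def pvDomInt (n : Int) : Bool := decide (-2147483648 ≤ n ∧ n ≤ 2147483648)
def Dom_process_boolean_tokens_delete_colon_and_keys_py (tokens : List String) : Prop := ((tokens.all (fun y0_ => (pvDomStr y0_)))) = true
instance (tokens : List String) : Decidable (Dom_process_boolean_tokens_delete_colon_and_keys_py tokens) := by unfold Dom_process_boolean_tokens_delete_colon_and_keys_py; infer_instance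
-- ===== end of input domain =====

-- B replaces A's backward scans + index-removal list + membership-filter by one forward pass
-- buffering tokens since the last operator (objective: alternative algorithm); return values agree on all inputs.

-- ===== PORT A =====
-- A's operator list ['AND', 'OR', '(']
def pvOps : List String := ["AND", "OR", "("]

-- A's inner while loop: decrement prev_index (starting at j) while > 0 and tokens[prev_index-1] is no operator
def pvScanBack (tokens : List String) : Nat → Nat
  | 0 => 0
  | q + 1 => if tokens.getD q "" ∈ pvOps then q + 1 else pvScanBack tokens q

-- A's first for loop: collect indices_to_remove (ranges prev_index..index for each ':')
def pvIndicesToRemove (tokens : List String) : List Nat :=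
  (tokens.zipIdx).foldl
    (fun acc p =>
      if p.1 = ":" then
        acc ++ List.range' (pvScanBack tokens p.2) (p.2 + 1 - pvScanBack tokens p.2)
      else acc) []

def process_boolean_tokens_delete_colon_and_keys_py (tokens : List String) : List String :=
  let indices_to_remove := pvIndicesToRemove tokens
  (tokens.zipIdx).foldl
    (fun out p => if p.2 ∉ indices_to_remove then out ++ [p.1] else out) []

-- ===== PORT B =====
-- B's loop body: state = (out, buf)
def pvStepB (s : List String × List String) (t : String) : List String × List String :=
  if t = ":" then (s.1, [])
  else if t ∈ pvOps then (s.1 ++ s.2 ++ [t], [])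
  else (s.1, s.2 ++ [t])

def process_boolean_tokens_delete_colon_and_keys_py_alt (tokens : List String) : List String :=
  let s := tokens.foldl pvStepB ([], [])
  s.1 ++ s.2

-- ===== PRECONDITION & SPEC =====
def Spec_process_boolean_tokens_delete_colon_and_keys_py (tokens : List String) (out : List String) : Prop := out = process_boolean_tokens_delete_colon_and_keys_py_alt tokens
instance (tokens : List String) (out : List String) : Decidable (Spec_process_boolean_tokens_delete_colon_and_keys_py tokens out) := by unfold Spec_process_boolean_tokens_delete_colon_and_keys_py; infer_instance

-- ===== CLAIM (what is proved, stated in full; the proofs are below) =====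
def Claim_equal_process_boolean_tokens_delete_colon_and_keys_py : Prop := ∀ (tokens : List String), Dom_process_boolean_tokens_delete_colon_and_keys_py tokens → Spec_process_boolean_tokens_delete_colon_and_keys_py tokens (process_boolean_tokens_delete_colon_and_keys_py tokens)

-- ===== LEMMAS AND PROOFS =====

-- "there is a ':' before the next operator (or end)" — the kept/removed criterion at a suffix
def pvC : List String → Bool
  | [] => false
  | t :: ts => if t ∈ pvOps then false else if t = ":" then true else pvC ts

-- common reference function: keep operators; drop every token from which a ':' is reachable without crossing an operator
def pvG : List String → List String
  | [] => []
  | t :: ts =>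
    if t ∈ pvOps then t :: pvG ts
    else if t = ":" ∨ pvC ts = true then pvG ts
    else t :: pvG ts

theorem pvC_cons_true_G {t : String} {ts : List String} (h : pvC (t :: ts) = true) :
    pvG (t :: ts) = pvG ts := by
  unfold pvC at h
  conv_lhs => rw [pvG]
  split_ifs at h ⊢ with h1 h2 h3 <;> simp_all

theorem pvC_cons_false_G {t : String} {ts : List String} (h : pvC (t :: ts) = false) :
    pvG (t :: ts) = t :: pvG ts := by
  unfold pvC at h
  conv_lhs => rw [pvG]
  split_ifs at h ⊢ with h1 h2 h3 <;> simp_all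

-- ===== B-side =====
theorem pvB_fold (ts : List String) : ∀ (out buf : List String),
    (ts.foldl pvStepB (out, buf)).1 ++ (ts.foldl pvStepB (out, buf)).2
      = out ++ (if pvC ts = true then [] else buf) ++ pvG ts := by
  induction ts with
  | nil => intro out buf; simp [pvC, pvG]
  | cons t ts ih =>
    intro out buf
    by_cases h1 : t = ":"
    · subst h1
      have hop : ¬ (":" ∈ pvOps) := by decide
      simp only [List.foldl_cons, pvStepB, if_pos]
      rw [ih]
      have hc : pvC (":" :: ts) = true := by simp [pvC, hop]
      rw [pvC_cons_true_G hc, hc]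
      split_ifs <;> simp_all
    · by_cases h2 : t ∈ pvOps
      · simp only [List.foldl_cons, pvStepB, if_neg h1, if_pos h2]
        rw [ih]
        have hc : pvC (t :: ts) = false := by simp [pvC, h2]
        rw [pvC_cons_false_G hc, hc]
        split_ifs <;> simp_all
      · simp only [List.foldl_cons, pvStepB, if_neg h1, if_neg h2]
        rw [ih]
        have hcc : pvC (t :: ts) = pvC ts := by simp [pvC, h1, h2]
        cases hts : pvC ts with
        | true =>
          rw [pvC_cons_true_G (hcc.trans hts), hcc, hts]
          simp
        | false =>
          rw [pvC_cons_false_G (hcc.trans hts), hcc, hts]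
          simp
  
theorem pvAlt_eq_G (tokens : List String) :
    process_boolean_tokens_delete_colon_and_keys_py_alt tokens = pvG tokens := by
  unfold process_boolean_tokens_delete_colon_and_keys_py_alt
  have := pvB_fold tokens [] []
  split_ifs at this <;> simpa using this

-- ===== A-side =====
theorem pvScanBack_le (tokens : List String) : ∀ j, pvScanBack tokens j ≤ j := by
  intro j
  induction j with
  | zero => simp [pvScanBack]
  | succ q ih => unfold pvScanBack; split_ifs <;> omega

theorem pvScanBack_le_iff (tokens : List String) : ∀ j i, i ≤ j →
    (pvScanBack tokens j ≤ i ↔ ∀ m, i ≤ m → m < j → ¬ tokens.getD m "" ∈ pvOps) := by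
  intro j
  induction j with
  | zero => intro i hi; simp [pvScanBack]
  | succ q ih =>
    intro i hi
    unfold pvScanBack
    by_cases hq : tokens.getD q "" ∈ pvOps
    · rw [if_pos hq]
      constructor
      · intro h m hm1 hm2; omega
      · intro h
        by_contra hlt
        exact (h q (by omega) (by omega)) hq
    · rw [if_neg hq]
      by_cases hiq : i ≤ q
      · rw [ih i hiq]
        constructor
        · intro h m hm1 hm2
          by_cases hmq : m = q
          · subst hmq; exact hq
          · exact h m hm1 (by omega)
        · intro h m hm1 hm2; exact h m hm1 (by omega)
      · have : i = q + 1 := by omega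
        subst this
        constructor
        · intro _ m hm1 hm2; omega
        · intro _; exact le_trans (pvScanBack_le tokens q) (by omega)

theorem pv_foldl_ext {α β : Type} (f : α → List β) (Q : α → Prop) [DecidablePred Q] :
    ∀ (l : List α) (init : List β),
    l.foldl (fun acc x => if Q x then acc ++ f x else acc) init
      = init ++ l.flatMap (fun x => if Q x then f x else []) := by
  intro l
  induction l with
  | nil => simp
  | cons a l ih =>
    intro init
    simp only [List.foldl_cons, List.flatMap_cons]
    by_cases h : Q a
    · rw [if_pos h, if_pos h, ih, List.append_assoc]
    · rw [if_neg h, if_neg h, ih]; simp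

theorem pv_mem_zipIdx_iff {α : Type} (xs : List α) (p : α × Nat) :
    p ∈ xs.zipIdx ↔ ∃ (j : Nat) (h : j < xs.length), p = (xs[j], j) := by
  constructor
  · intro h
    obtain ⟨x, i⟩ := p
    obtain ⟨h1, h2, h3⟩ := List.mem_zipIdx h
    exact ⟨i, by omega, by simp [h3]⟩
  · rintro ⟨j, h, rfl⟩
    refine List.mem_iff_getElem.2 ⟨j, by simpa using h, ?_⟩
    rw [List.getElem_zipIdx]
    simp

theorem pv_indices_eq (tokens : List String) :
    pvIndicesToRemove tokens = tokens.zipIdx.flatMap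
      (fun p => if p.1 = ":" then List.range' (pvScanBack tokens p.2) (p.2 + 1 - pvScanBack tokens p.2) else []) := by
  unfold pvIndicesToRemove
  simpa using pv_foldl_ext
    (fun (p : String × Nat) => List.range' (pvScanBack tokens p.2) (p.2 + 1 - pvScanBack tokens p.2))
    (fun (p : String × Nat) => p.1 = ":") tokens.zipIdx []

theorem pv_mem_indices_iff (tokens : List String) (i : Nat) :
    i ∈ pvIndicesToRemove tokens ↔
      ∃ j, j < tokens.length ∧ tokens.getD j "" = ":" ∧ pvScanBack tokens j ≤ i ∧ i ≤ j := by
  rw [pv_indices_eq]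
  simp only [List.mem_flatMap]
  constructor
  · rintro ⟨p, hp, hi⟩
    obtain ⟨j, hj, rfl⟩ := (pv_mem_zipIdx_iff tokens p).1 hp
    by_cases hcol : tokens[j] = ":"
    · rw [if_pos hcol] at hi
      rw [List.mem_range'_1] at hi
      dsimp only at hi
      have hsb := pvScanBack_le tokens j
      refine ⟨j, hj, ?_, by omega, by omega⟩
      simp [List.getD_eq_getElem?_getD, List.getElem?_eq_getElem hj, hcol]
    · rw [if_neg hcol] at hi; simp at hi
  · rintro ⟨j, hj, hcol, hle, hij⟩
    have hget : tokens[j] = ":" := by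
      rwa [List.getD_eq_getElem?_getD, List.getElem?_eq_getElem hj] at hcol
    refine ⟨(tokens[j], j), (pv_mem_zipIdx_iff tokens _).2 ⟨j, hj, rfl⟩, ?_⟩
    have hmem : i ∈ List.range' (pvScanBack tokens j) (j + 1 - pvScanBack tokens j) := by
      rw [List.mem_range'_1]
      have hsb := pvScanBack_le tokens j
      omega
    simpa [hget] using hmem

theorem pvC_iff (l : List String) :
    pvC l = true ↔ ∃ k, k < l.length ∧ l.getD k "" = ":" ∧ ∀ m, m < k → ¬ l.getD m "" ∈ pvOps := by
  induction l with
  | nil => simp [pvC]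
  | cons t ts ih =>
    unfold pvC
    by_cases h2 : t ∈ pvOps
    · rw [if_pos h2]
      constructor
      · intro hF; exact absurd hF (by simp)
      · rintro ⟨k, hk, hcol, hm⟩
        exfalso
        cases k with
        | zero =>
          rw [List.getD_cons_zero] at hcol
          subst hcol; revert h2; decide
        | succ k' => exact (hm 0 (by omega)) (by rw [List.getD_cons_zero]; exact h2)
    · rw [if_neg h2]
      by_cases h1 : t = ":"
      · rw [if_pos h1]
        simp only [true_iff]
        exact ⟨0, by simp, by simpa using h1, by omega⟩
      · rw [if_neg h1]
        rw [ih]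
        constructor
        · rintro ⟨k, hk, hcol, hm⟩
          refine ⟨k + 1, by simpa using hk, by simpa using hcol, ?_⟩
          intro m hm1
          cases m with
          | zero => simpa using h2
          | succ m' => simpa using hm m' (by omega)
        · rintro ⟨k, hk, hcol, hm⟩
          cases k with
          | zero => rw [List.getD_cons_zero] at hcol; exact absurd hcol h1
          | succ k' =>
            refine ⟨k', by simpa using hk, by simpa using hcol, ?_⟩
            intro m hm1
            have := hm (m + 1) (by omega)
            simpa using this

theorem pv_getD_drop (tokens : List String) (i k : Nat) :
    (tokens.drop i).getD k "" = tokens.getD (i + k) "" := by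
  rw [List.getD_eq_getElem?_getD, List.getElem?_drop, List.getD_eq_getElem?_getD]

theorem pv_removed_iff (tokens : List String) (i : Nat) (hi : i < tokens.length) :
    i ∈ pvIndicesToRemove tokens ↔ pvC (tokens.drop i) = true := by
  rw [pv_mem_indices_iff, pvC_iff]
  constructor
  · rintro ⟨j, hj, hcol, hle, hij⟩
    have hnop := (pvScanBack_le_iff tokens j i hij).1 hle
    refine ⟨j - i, by simp; omega, ?_, ?_⟩
    · rw [pv_getD_drop]
      rwa [Nat.add_sub_cancel' hij]
    · intro m hm
      rw [pv_getD_drop]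
      exact hnop (i + m) (by omega) (by omega)
  · rintro ⟨k, hk, hcol, hm⟩
    rw [List.length_drop] at hk
    rw [pv_getD_drop] at hcol
    refine ⟨i + k, by omega, hcol, ?_, by omega⟩
    rw [pvScanBack_le_iff tokens (i + k) i (by omega)]
    intro m hm1 hm2
    have := hm (m - i) (by omega)
    rw [pv_getD_drop] at this
    rwa [Nat.add_sub_cancel' hm1] at this

theorem pvA_fold (full : List String) : ∀ (rest : List String) (i : Nat) (out : List String),
    full.drop i = rest →
    (rest.zipIdx i).foldl
        (fun out p => if p.2 ∉ pvIndicesToRemove full then out ++ [p.1] else out) out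
      = out ++ pvG rest := by
  intro rest
  induction rest with
  | nil => intro i out _; simp [pvG]
  | cons t ts ih =>
    intro i out hdrop
    have hi : i < full.length := by
      by_contra h
      rw [List.drop_eq_nil_iff.2 (by omega)] at hdrop
      exact absurd hdrop (by simp)
    have hts : full.drop (i + 1) = ts := by
      have : full.drop (i + 1) = (full.drop i).drop 1 := by rw [List.drop_drop]
      rw [this, hdrop]; simp
    have hrm : i ∈ pvIndicesToRemove full ↔ pvC (t :: ts) = true := by
      rw [pv_removed_iff full i hi, hdrop]
    rw [List.zipIdx_cons, List.foldl_cons]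
    cases hc : pvC (t :: ts) with
    | true =>
      rw [if_neg (by simp [hrm, hc])]
      rw [ih (i + 1) out hts, pvC_cons_true_G hc]
    | false =>
      rw [if_pos (by simp [hrm, hc])]
      rw [ih (i + 1) (out ++ [t]) hts, pvC_cons_false_G hc]
      simp

theorem pvA_eq_G (tokens : List String) :
    process_boolean_tokens_delete_colon_and_keys_py tokens = pvG tokens := by
  unfold process_boolean_tokens_delete_colon_and_keys_py
  have := pvA_fold tokens tokens 0 [] (by simp)
  simpa using this

-- ===== VERDICT (by name: the statement is the Claim_ definition above) =====
theorem process_boolean_tokens_delete_colon_and_keys_py_spec : Claim_equal_process_boolean_tokens_delete_colon_and_keys_py := by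
  intro tokens _
  unfold Spec_process_boolean_tokens_delete_colon_and_keys_py
  exact (pvA_eq_G tokens).trans (pvAlt_eq_G tokens).symm
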